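-- pv_equiv track=rewrite | github.com/oxigraph/oxigraph | bench/reasoner/generate_lubm.py | universities_for_target
-- ===== SOURCE A (Python) =====
-- DEPTS_PER_UNI = 4
--
-- GROUPS_PER_DEPT = 2
--
-- FACULTY_PER_DEPT = 5
--
-- STUDENTS_PER_DEPT = 10
--
-- COLLEAGUE_EDGES_PER_DEPT = 4
--
-- def estimate_triples(num_universities: int) -> int:
--     """Rough pre generation estimate so we can pick `num_universities`."""
--     per_uni = (
--         1  # University type
--         + DEPTS_PER_UNI * (2 + GROUPS_PER_DEPT * 2)  # dept type+subOrg, groups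
--         + DEPTS_PER_UNI * FACULTY_PER_DEPT * 2  # faculty type+worksFor
--         + DEPTS_PER_UNI  # headOf
--         + DEPTS_PER_UNI * STUDENTS_PER_DEPT * 2  # student type+memberOf
--         + DEPTS_PER_UNI * COLLEAGUE_EDGES_PER_DEPT  # colleague
--     )
--     tbox_triples = 90  # approximate size of the TBox block
--     return tbox_triples + num_universities * per_uni
--
-- def universities_for_target(target: int) -> int:
--     """Pick the university count that lands the triple count closest to target."""
--     # Binary search on estimate_triples.
--     lo, hi = 1, 1
--     while estimate_triples(hi) < target:
--         hi *= 2
--     while lo < hi: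
--         mid = (lo + hi) // 2
--         if estimate_triples(mid) < target:
--             lo = mid + 1
--         else:
--             hi = mid
--     # `lo` is the smallest count with estimate >= target. Pick it.
--     return max(1, lo)
-- ===== SOURCE B (Python) =====
-- DEPTS_PER_UNI = 4
-- GROUPS_PER_DEPT = 2
-- FACULTY_PER_DEPT = 5
-- STUDENTS_PER_DEPT = 10
-- COLLEAGUE_EDGES_PER_DEPT = 4
--
--
-- def universities_for_target(target: int) -> int:
--     """Pick the smallest university count whose triple estimate reaches target."""
--     # Closed-form inverse of the linear estimate 90 + n * per_uni: no search loop.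
--     per_uni = (
--         1
--         + DEPTS_PER_UNI * (2 + GROUPS_PER_DEPT * 2)
--         + DEPTS_PER_UNI * FACULTY_PER_DEPT * 2
--         + DEPTS_PER_UNI
--         + DEPTS_PER_UNI * STUDENTS_PER_DEPT * 2
--         + DEPTS_PER_UNI * COLLEAGUE_EDGES_PER_DEPT
--     )
--     tbox_triples = 90
--     n = (target - tbox_triples + per_uni - 1) // per_uni  # integer ceiling
--     return max(1, n)
-- ===== Notes on version B (the rewrite author's own statement) =====
-- stated objective: faster
-- what changed: Replaces the exponential-growth phase plus binary search over estimate_triples with the direct integer-ceiling closed-form inverse of the linear estimate, max(1, ceil((target-90)/165)), with no loop at all.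
import Mathlib
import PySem

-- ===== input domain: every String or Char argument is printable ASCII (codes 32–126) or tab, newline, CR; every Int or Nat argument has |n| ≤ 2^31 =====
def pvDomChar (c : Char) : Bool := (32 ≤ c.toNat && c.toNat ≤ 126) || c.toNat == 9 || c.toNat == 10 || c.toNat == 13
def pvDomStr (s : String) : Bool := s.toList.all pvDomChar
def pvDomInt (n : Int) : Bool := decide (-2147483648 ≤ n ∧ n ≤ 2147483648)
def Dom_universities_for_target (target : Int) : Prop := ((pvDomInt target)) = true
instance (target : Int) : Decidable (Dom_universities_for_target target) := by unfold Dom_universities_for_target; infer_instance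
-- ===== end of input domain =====

-- B replaces A's doubling phase + binary search by the O(1) integer-ceiling inverse
-- of the linear estimate (faster: no loop).

-- ===== PORT A =====
def estimate_triples (num_universities : Int) : Int :=
  let per_uni : Int :=
    1
    + 4 * (2 + 2 * 2)
    + 4 * 5 * 2
    + 4
    + 4 * 10 * 2
    + 4 * 4
  let tbox_triples : Int := 90
  tbox_triples + num_universities * per_uni

-- first while loop of A: double hi until the estimate reaches target
-- (the positivity argument only justifies termination; the computation is A's)
def pvGrow (target hi : Int) (h : 0 < hi) : Int :=
  if estimate_triples hi < target then pvGrow target (2 * hi) (by omega) else hi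
termination_by (target - estimate_triples hi).toNat
decreasing_by
  simp only [estimate_triples] at *
  omega

-- second while loop of A: binary search for the smallest count with estimate ≥ target
def pvBS (target lo hi : Int) : Int :=
  if _hlt : lo < hi then
    let mid := PySem.Int.floordiv (lo + hi) 2
    if estimate_triples mid < target then pvBS target (mid + 1) hi
    else pvBS target lo mid
  else lo
termination_by (hi - lo).toNat
decreasing_by
  · have h := PySem.Int.floordiv_two_mid_bounds (le_of_lt _hlt)
    omega
  · have h1 : PySem.Int.floordiv (lo + hi) 2 < hi := by
      rw [PySem.Int.floordiv_lt_iff_lt_mul (by omega)]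
      omega
    have _h2 := PySem.Int.floordiv_two_mid_bounds (le_of_lt _hlt)
    omega

def universities_for_target (target : Int) : Int :=
  let hi := pvGrow target 1 (by norm_num)
  let lo := pvBS target 1 hi
  max 1 lo

-- ===== PORT B =====
def universities_for_target_alt (target : Int) : Int :=
  let per_uni : Int :=
    1
    + 4 * (2 + 2 * 2)
    + 4 * 5 * 2
    + 4
    + 4 * 10 * 2
    + 4 * 4
  let tbox_triples : Int := 90
  let n := PySem.Int.floordiv (target - tbox_triples + per_uni - 1) per_uni
  max 1 n

-- ===== PRECONDITION & SPEC =====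
def Spec_universities_for_target (target : Int) (out : Int) : Prop := out = universities_for_target_alt target
instance (target : Int) (out : Int) : Decidable (Spec_universities_for_target target out) := by unfold Spec_universities_for_target; infer_instance

-- ===== CLAIM (what is proved, stated in full; the proofs are below) =====
def Claim_equal_universities_for_target : Prop := ∀ (target : Int), Dom_universities_for_target target → Spec_universities_for_target target (universities_for_target target)

-- ===== LEMMAS AND PROOFS =====

-- A's growth loop returns a count at least hi whose estimate reaches target.
theorem pvGrow_spec (target hi : Int) (h : 0 < hi) :
    hi ≤ pvGrow target hi h ∧ target ≤ estimate_triples (pvGrow target hi h) := by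
  fun_induction pvGrow target hi h with
  | case1 hi h hlt ih =>
    refine ⟨?_, ih.2⟩
    have := ih.1
    omega
  | case2 hi h hge =>
    exact ⟨le_refl _, by omega⟩

-- A's binary search returns b whenever b is the boundary between counts whose
-- estimate misses target and those that reach it, and lo ≤ b ≤ hi.
theorem pvBS_eq (target : Int) (b : Int)
    (hlow : ∀ m : Int, 1 ≤ m → m < b → estimate_triples m < target)
    (hhigh : ∀ m : Int, b ≤ m → target ≤ estimate_triples m) :
    ∀ (k : Nat) (lo hi : Int), (hi - lo).toNat = k →
      1 ≤ lo → lo ≤ b → b ≤ hi → pvBS target lo hi = b := by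
  intro k
  induction k using Nat.strong_induction_on with
  | _ k ih =>
    intro lo hi hk h1 h2 h3
    rw [pvBS]
    by_cases hlt : lo < hi
    · simp only [hlt, dif_pos]
      have hmid := PySem.Int.floordiv_two_mid_bounds (le_of_lt hlt)
      have hmidlt : PySem.Int.floordiv (lo + hi) 2 < hi := by
        rw [PySem.Int.floordiv_lt_iff_lt_mul (by omega)]
        omega
      set mid := PySem.Int.floordiv (lo + hi) 2 with hmiddef
      by_cases hc : estimate_triples mid < target
      · simp only [hc, if_pos]
        have hmb : mid < b := by
          by_contra hnb
          exact absurd (hhigh mid (by omega)) (by omega)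
        exact ih (hi - (mid + 1)).toNat (by omega) (mid + 1) hi rfl (by omega) (by omega) h3
      · simp only [hc, if_neg, not_false_iff]
        have hbm : b ≤ mid := by
          by_contra hnb
          exact hc (hlow mid (by omega) (by omega))
        exact ih (mid - lo).toNat (by omega) lo mid rfl h1 h2 hbm
    · simp only [hlt, dif_neg, not_false_iff]
      omega

-- ===== VERDICT (by name: the statement is the Claim_ definition above) =====
theorem universities_for_target_spec : Claim_equal_universities_for_target := by
  intro target _
  unfold Spec_universities_for_target universities_for_target universities_for_target_alt
  have he : (target - 90 + (1 + 4 * (2 + 2 * 2) + 4 * 5 * 2 + 4 + 4 * 10 * 2 + 4 * 4) - 1 : Int)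
      = target + 74 := by ring
  have hdiv : PySem.Int.floordiv (target - 90 + (1 + 4 * (2 + 2 * 2) + 4 * 5 * 2 + 4 + 4 * 10 * 2 + 4 * 4) - 1)
      (1 + 4 * (2 + 2 * 2) + 4 * 5 * 2 + 4 + 4 * 10 * 2 + 4 * 4) = (target + 74) / 165 := by
    rw [he]
    rw [show (1 + 4 * (2 + 2 * 2) + 4 * 5 * 2 + 4 + 4 * 10 * 2 + 4 * 4 : Int) = 165 by ring]
    exact PySem.Int.floordiv_eq_ediv_of_pos (by norm_num)
  set c : Int := (target + 74) / 165 with hc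
  have hcmul : 165 * c ≤ target + 74 ∧ target + 74 < 165 * c + 165 := by omega
  set b : Int := max 1 c with hb
  have hlow : ∀ m : Int, 1 ≤ m → m < b → estimate_triples m < target := by
    intro m hm1 hmb
    simp only [estimate_triples]
    have : m < c := by omega
    nlinarith [hcmul.1, hcmul.2]
  have hhigh : ∀ m : Int, b ≤ m → target ≤ estimate_triples m := by
    intro m hmb
    simp only [estimate_triples]
    have hcm : c ≤ m := le_trans (le_max_right 1 c) hmb
    nlinarith [hcmul.1]
  have hgrow := pvGrow_spec target 1 (by norm_num)
  set hi0 := pvGrow target 1 (by norm_num) with hhi0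
  have hbhi : b ≤ hi0 := by
    by_contra hn
    exact absurd (hlow hi0 (by omega) (by omega)) (by omega)
  have hbs := pvBS_eq target b hlow hhigh (hi0 - 1).toNat 1 hi0 rfl (le_refl 1)
      (le_max_left 1 c) hbhi
  dsimp only
  rw [hbs, hdiv, hb]
  rw [← max_assoc, max_self]
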